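-- pv_equiv track=rewrite | github.com/coleflennikenmsft/multi-agent-aw | src/state/config.py | _is_valid_container_name
-- ===== SOURCE A (Python) =====
-- def _is_valid_container_name(name: str) -> bool:
--     """Validate Azure Blob container name format.
--
--     Args:
--         name: Container name to validate
--
--     Returns:
--         True if valid, False otherwise
--     """
--     if not (3 <= len(name) <= 63):
--         return False
--
--     if name.startswith('-') or name.endswith('-'):
--         return False
--
--     if '--' in name:
--         return False
--
--     # Must contain only lowercase letters, numbers, and hyphens
--     return all(c.islower() or c.isdigit() or c == '-' for c in name)
-- ===== SOURCE B (Python) =====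
-- def _is_valid_container_name(name: str) -> bool:
--     """Validate Azure Blob container name: split on '-' and require every
--     segment to be a nonempty run of lowercase/digit characters."""
--     if not (3 <= len(name) <= 63):
--         return False
--     return all(seg != '' and all(c.islower() or c.isdigit() for c in seg)
--                for seg in name.split('-'))
-- ===== Notes on version B (the rewrite author's own statement) =====
-- stated objective: alternative
-- what changed: B validates by splitting the name at hyphens into segments and requiring every segment to be nonempty and all-lowercase/digit, replacing A's edge-hyphen checks, double-hyphen substring search and whole-string character scan.
import Mathlib
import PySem

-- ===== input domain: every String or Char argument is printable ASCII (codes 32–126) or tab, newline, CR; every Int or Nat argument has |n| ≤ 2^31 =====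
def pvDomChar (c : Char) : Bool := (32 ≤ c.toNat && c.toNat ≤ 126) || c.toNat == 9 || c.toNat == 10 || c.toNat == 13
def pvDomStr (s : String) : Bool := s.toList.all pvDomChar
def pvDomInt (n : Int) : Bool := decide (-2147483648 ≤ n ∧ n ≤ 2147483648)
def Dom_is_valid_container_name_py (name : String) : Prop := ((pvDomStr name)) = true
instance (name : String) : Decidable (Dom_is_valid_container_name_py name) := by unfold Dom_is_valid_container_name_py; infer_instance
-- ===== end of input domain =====

-- B validates by splitting the name on '-' into segments (nonempty, all lowercase/digit) instead of A's startswith/endswith, '--' substring search and whole-string character scan; same return value, proved below.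


-- ===== PORT A =====
def is_valid_container_name_py (name : String) : Bool :=
  if ¬ (3 ≤ PySem.Str.len name ∧ PySem.Str.len name ≤ 63) then false
  else if PySem.Str.startswith name "-" || PySem.Str.endswith name "-" then false
  else if PySem.Str.isIn "--" name then false
  else name.toList.all (fun c => PySem.Chars.islower c || PySem.Chars.isdigit c || c == '-')

-- ===== PORT B =====
-- the per-character body of Source B's inner all(...)
def pvPred (c : Char) : Bool := PySem.Chars.islower c || PySem.Chars.isdigit c

-- the per-segment body of Source B's outer all(...): seg != '' and all(... for c in seg)
def pvSegOk (seg : List Char) : Bool := !seg.isEmpty && seg.all pvPred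

-- Source B: name.split('-') is ported as List.splitOn '-' on the code points (identical for a 1-char separator)
def is_valid_container_name_py_alt (name : String) : Bool :=
  if ¬ (3 ≤ PySem.Str.len name ∧ PySem.Str.len name ≤ 63) then false
  else (name.toList.splitOn '-').all pvSegOk

-- ===== PRECONDITION & SPEC =====
def Spec_is_valid_container_name_py (name : String) (out : Bool) : Prop := out = is_valid_container_name_py_alt name
instance (name : String) (out : Bool) : Decidable (Spec_is_valid_container_name_py name out) := by unfold Spec_is_valid_container_name_py; infer_instance

-- ===== CLAIM (what is proved, stated in full; the proofs are below) =====
def Claim_equal_is_valid_container_name_py : Prop := ∀ (name : String), Dom_is_valid_container_name_py name → Spec_is_valid_container_name_py name (is_valid_container_name_py name)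

-- ===== LEMMAS AND PROOFS =====

theorem singleton_prefix_iff (cs : List Char) : ['-'] <+: cs ↔ cs.head? = some '-' := by
  cases cs with
  | nil => simp
  | cons c rest => simp [List.cons_prefix_cons, eq_comm]

theorem singleton_suffix_iff (cs : List Char) : ['-'] <:+ cs ↔ cs.getLast? = some '-' := by
  rw [← List.reverse_prefix, ← List.head?_reverse]
  exact singleton_prefix_iff cs.reverse

def pvOkc (c : Char) : Bool := pvPred c || c == '-'

-- the outer all(...) of Source B with the nonemptiness check on the FIRST segment dropped
def pvRelaxOk : List (List Char) → Bool
  | [] => true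
  | h :: t => h.all pvPred && t.all pvSegOk

-- joint characterisation of Source B's split-based check
theorem split_key (cs : List Char) :
    (pvRelaxOk (cs.splitOn '-') = true ↔
      ((∀ c ∈ cs, pvOkc c) ∧ ¬ ['-', '-'] <:+: cs ∧ cs.getLast? ≠ some '-'))
    ∧ ((cs.splitOn '-').all pvSegOk = true ↔
      (cs.head? ≠ some '-' ∧ cs ≠ [] ∧
        (∀ c ∈ cs, pvOkc c) ∧ ¬ ['-', '-'] <:+: cs ∧ cs.getLast? ≠ some '-')) := by
  induction cs with
  | nil => simp [List.splitOn, List.splitOnP_nil, pvRelaxOk, pvSegOk]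
  | cons c rest ih =>
    have hdd_cons : (['-', '-'] <:+: (c :: rest)) ↔
        ((c = '-' ∧ rest.head? = some '-') ∨ ['-', '-'] <:+: rest) := by
      rw [List.infix_cons_iff]
      constructor
      · rintro (hp | hi)
        · rw [List.cons_prefix_cons] at hp
          exact Or.inl ⟨hp.1.symm, (singleton_prefix_iff rest).mp hp.2⟩
        · exact Or.inr hi
      · rintro (⟨rfl, hh⟩ | hi)
        · exact Or.inl (List.cons_prefix_cons.mpr ⟨rfl, (singleton_prefix_iff rest).mpr hh⟩)
        · exact Or.inr hi
    have hlast_cons : ((c :: rest).getLast? = some '-') ↔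
        ((rest = [] ∧ c = '-') ∨ rest.getLast? = some '-') := by
      cases rest with
      | nil => simp
      | cons r rs => simp [List.getLast?_cons_cons]
    by_cases hc : c = '-'
    · subst hc
      have hsplit : (('-' :: rest).splitOn '-') = [] :: rest.splitOn '-' := by
        simp [List.splitOn, List.splitOnP_cons]
      constructor
      · rw [hsplit]
        show ([].all pvPred && (rest.splitOn '-').all pvSegOk) = true ↔ _
        simp only [List.all_nil, Bool.true_and]
        rw [ih.2]
        constructor
        · rintro ⟨hh, hne, hall, hdd, hlast⟩
          refine ⟨?_, ?_, ?_⟩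
          · intro x hx
            rcases List.mem_cons.mp hx with rfl | hx
            · simp [pvOkc]
            · exact hall x hx
          · rw [hdd_cons]; rintro (⟨-, hh'⟩ | hi) <;> [exact hh hh'; exact hdd hi]
          · rw [Ne, hlast_cons]; rintro (⟨rfl, -⟩ | h) <;> [exact hne rfl; exact hlast h]
        · rintro ⟨hall, hdd, hlast⟩
          have hh : rest.head? ≠ some '-' := fun hh =>
            hdd (hdd_cons.mpr (Or.inl ⟨rfl, hh⟩))
          have hne : rest ≠ [] := fun hn =>
            hlast (hlast_cons.mpr (Or.inl ⟨hn, rfl⟩))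
          exact ⟨hh, hne, fun x hx => hall x (by simp [hx]),
            fun hi => hdd (hdd_cons.mpr (Or.inr hi)),
            fun h => hlast (hlast_cons.mpr (Or.inr h))⟩
      · rw [hsplit]
        show (pvSegOk [] && (rest.splitOn '-').all pvSegOk) = true ↔ _
        simp [pvSegOk]
    · have hnc : (c == '-') = false := by simp [hc]
      obtain ⟨h, t, hL⟩ := List.exists_cons_of_ne_nil (List.splitOnP_ne_nil (· == '-') rest)
      have hsplit : ((c :: rest).splitOn '-') = (c :: h) :: t := by
        simp only [List.splitOn, List.splitOnP_cons, hnc, Bool.false_eq_true, if_false]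
        rw [hL]; rfl
      have hrest : (rest.splitOn '-') = h :: t := hL
      have hcommon : (pvPred c && pvRelaxOk (h :: t)) = true ↔
          ((∀ x ∈ c :: rest, pvOkc x) ∧ ¬ ['-', '-'] <:+: (c :: rest) ∧
            (c :: rest).getLast? ≠ some '-') := by
        rw [Bool.and_eq_true]
        have := ih.1; rw [hrest] at this; rw [this]
        constructor
        · rintro ⟨hp, hall, hdd, hlast⟩
          refine ⟨?_, ?_, ?_⟩
          · intro x hx
            rcases List.mem_cons.mp hx with rfl | hx
            · simp [pvOkc, hp]
            · exact hall x hx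
          · rw [hdd_cons]; rintro (⟨rfl, -⟩ | hi) <;> [exact hc rfl; exact hdd hi]
          · rw [Ne, hlast_cons]; rintro (⟨-, rfl⟩ | hl) <;> [exact hc rfl; exact hlast hl]
        · rintro ⟨hall, hdd, hlast⟩
          have hp : pvPred c = true := by
            have := hall c (by simp)
            simpa [pvOkc, hnc] using this
          exact ⟨hp, fun x hx => hall x (by simp [hx]),
            fun hi => hdd (hdd_cons.mpr (Or.inr hi)),
            fun hl => hlast (hlast_cons.mpr (Or.inr hl))⟩
      constructor
      · rw [hsplit]
        show ((c :: h).all pvPred && t.all pvSegOk) = true ↔ _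
        rw [← hcommon]
        simp [pvRelaxOk, Bool.and_assoc]
      · rw [hsplit]
        show (pvSegOk (c :: h) && t.all pvSegOk) = true ↔ _
        rw [← hcommon]
        simp only [pvSegOk, pvRelaxOk, List.isEmpty_cons, Bool.not_false, Bool.true_and,
          List.all_cons, Bool.and_assoc]
        simp [hc]


-- ===== VERDICT (by name: the statement is the Claim_ definition above) =====
theorem is_valid_container_name_py_spec : Claim_equal_is_valid_container_name_py := by
  intro name _
  unfold Spec_is_valid_container_name_py is_valid_container_name_py is_valid_container_name_py_alt
  simp only [PySem.Str.len_eq, PySem.Str.startswith_eq, PySem.Str.endswith_eq, PySem.Str.isIn_eq]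
  by_cases hlen : 3 ≤ name.toList.length ∧ name.toList.length ≤ 63
  · have hne : name.toList ≠ [] := by
      intro h; rw [h] at hlen; simp at hlen
    have hsw : PySem.Chars.startswith name.toList ("-".toList) = decide (name.toList.head? = some '-') := by
      rw [Bool.eq_iff_iff]; simp [PySem.Chars.startswith_iff, singleton_prefix_iff]
    have hew : PySem.Chars.endswith name.toList ("-".toList) = decide (name.toList.getLast? = some '-') := by
      rw [Bool.eq_iff_iff]; simp [PySem.Chars.endswith_iff, singleton_suffix_iff]
    have hin : PySem.Chars.isIn ("--".toList) name.toList = decide (['-', '-'] <:+: name.toList) := by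
      rw [Bool.eq_iff_iff]; simp [PySem.Chars.isIn_iff_infix]
    rw [if_neg (by omega : ¬¬(3 ≤ (name.toList.length : Int) ∧ (name.toList.length : Int) ≤ 63)),
        if_neg (by omega : ¬¬(3 ≤ (name.toList.length : Int) ∧ (name.toList.length : Int) ≤ 63))]
    simp only [hsw, hew, hin]
    have hkey := (split_key name.toList).2
    by_cases h1 : name.toList.head? = some '-'
    · have hB : (name.toList.splitOn '-').all pvSegOk = false := by
        rw [Bool.eq_false_iff]; intro h; exact (hkey.mp h).1 h1
      simp [h1, hB]
    · by_cases h2 : name.toList.getLast? = some '-'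
      · have hB : (name.toList.splitOn '-').all pvSegOk = false := by
          rw [Bool.eq_false_iff]; intro h; exact (hkey.mp h).2.2.2.2 h2
        simp [h1, h2, hB]
      · by_cases hdd : ['-', '-'] <:+: name.toList
        · have hB : (name.toList.splitOn '-').all pvSegOk = false := by
            rw [Bool.eq_false_iff]; intro h; exact (hkey.mp h).2.2.2.1 hdd
          simp [h1, h2, hdd, hB]
        · by_cases hall : ∀ c ∈ name.toList, pvOkc c
          · have hB : (name.toList.splitOn '-').all pvSegOk = true :=
              hkey.mpr ⟨h1, hne, hall, hdd, h2⟩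
            have hA : name.toList.all (fun c => PySem.Chars.islower c || PySem.Chars.isdigit c || c == '-') = true := by
              simpa [List.all_eq_true, pvOkc, pvPred, Bool.or_assoc] using hall
            simp [h1, h2, hdd, hA, hB]
          · have hB : (name.toList.splitOn '-').all pvSegOk = false := by
              rw [Bool.eq_false_iff]; intro h; exact hall (hkey.mp h).2.2.1
            have hA : name.toList.all (fun c => PySem.Chars.islower c || PySem.Chars.isdigit c || c == '-') = false := by
              rw [Bool.eq_false_iff]; intro h
              exact hall (by simpa [List.all_eq_true, pvOkc, pvPred, Bool.or_assoc] using h)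
            simp [h1, h2, hdd, hA, hB]
  · rw [if_pos (by omega : ¬(3 ≤ (name.toList.length : Int) ∧ (name.toList.length : Int) ≤ 63)),
        if_pos (by omega : ¬(3 ≤ (name.toList.length : Int) ∧ (name.toList.length : Int) ≤ 63))]
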